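-- pv_equiv track=rewrite | github.com/wilmurillo-ai/Design-Assistant | .skills/openclaw-skills/skills/yangagent/whiteboard-animation/scripts/generate_whiteboard.py | _count_frontier_support
-- ===== SOURCE A (Python) =====
-- def _count_frontier_support(cell, adjacency, unvisited, current=None, max_depth=2):
--     visited = {cell}
--     queue = [(cell, 0)]
--     support = 0
--
--     while queue:
--         node, depth = queue.pop(0)
--         if depth >= max_depth:
--             continue
--
--         for neighbor in adjacency[node]:
--             if neighbor == current or neighbor in visited or neighbor not in unvisited:
--                 continue
--             visited.add(neighbor)
--             support += 1
--             queue.append((neighbor, depth + 1))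
--
--     return support
-- ===== SOURCE B (Python) =====
-- def _count_frontier_support(cell, adjacency, unvisited, current=None, max_depth=2):
--     reached = {cell}
--     for _ in range(max_depth):
--         nxt = set(reached)
--         for node in reached:
--             for nb in adjacency.get(node, []):
--                 if nb != current and nb in unvisited:
--                     nxt.add(nb)
--         if len(nxt) == len(reached):
--             break
--         reached = nxt
--     return len(reached) - 1
-- ===== Notes on version B (the rewrite author's own statement) =====
-- stated objective: alternative
-- what changed: A's depth-tagged FIFO queue BFS with an incremental support counter is replaced by a fixpoint closure iteration: each round rebuilds a snapshot set nxt as reached plus ALL allowed neighbors of every reached node (no queue, no frontier, no per-neighbor visited test), stops when the set stops growing or after max_depth rounds, and derives the count as len(reached)-1 at the end.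
-- outside the precondition, e.g. on _count_frontier_support(0, {0: [1], 1: [], 2: [5]}, {1, 2, 5}, None, 4): A returns 1, B returns 1
import Mathlib
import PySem

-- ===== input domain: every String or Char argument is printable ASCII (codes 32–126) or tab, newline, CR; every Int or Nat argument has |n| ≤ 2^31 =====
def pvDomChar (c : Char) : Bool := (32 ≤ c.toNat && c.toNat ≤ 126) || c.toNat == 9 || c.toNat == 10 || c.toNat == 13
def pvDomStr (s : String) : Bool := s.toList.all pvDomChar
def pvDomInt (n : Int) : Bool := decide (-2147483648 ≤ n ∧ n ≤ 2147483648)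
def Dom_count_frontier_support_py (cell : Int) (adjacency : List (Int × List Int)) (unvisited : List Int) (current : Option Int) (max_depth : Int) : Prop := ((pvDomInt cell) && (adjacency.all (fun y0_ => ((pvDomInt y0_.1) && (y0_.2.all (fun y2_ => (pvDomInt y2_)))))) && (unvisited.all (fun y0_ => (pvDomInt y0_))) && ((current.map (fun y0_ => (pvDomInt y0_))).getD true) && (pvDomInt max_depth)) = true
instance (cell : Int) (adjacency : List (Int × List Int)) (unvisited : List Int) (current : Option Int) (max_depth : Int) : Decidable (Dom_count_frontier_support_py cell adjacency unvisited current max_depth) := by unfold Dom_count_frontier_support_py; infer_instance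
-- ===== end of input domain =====

-- B replaces A's depth-tagged FIFO-queue BFS (with its incremental support counter and
-- per-neighbor visited test) by a fixpoint closure iteration: each round rebuilds a snapshot
-- set as reached ∪ (allowed neighbors of EVERY reached node), stops when the set stops growing
-- or after max_depth rounds, and derives the count as len(reached) - 1 at the end.
-- Equivalence of the RETURN value is proved on all inputs where the Python A raises no KeyError.

-- ===== PORT A =====
-- inner `for neighbor in adjacency[node]` loop body of A, on state (visited, appended, support)
def pvStepA (unvisited : List Int) (current : Option Int)
    (st : PySem.Set Int × List Int × Int) (neighbor : Int) :
    PySem.Set Int × List Int × Int :=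
  if (some neighbor == current) || PySem.Set.contains st.1 neighbor || !(decide (neighbor ∈ unvisited)) then
    st
  else
    (PySem.Set.add st.1 neighbor, st.2.1 ++ [neighbor], st.2.2 + 1)

-- termination measure helper: number of distinct unvisited nodes not yet in `vis`
def pvSlack (unvisited : List Int) (vis : PySem.Set Int) : Nat :=
  ((PySem.List.dedup unvisited).filter (fun u => !(PySem.Set.contains vis u))).length

-- cited by `decreasing_by` of pvLoopA below (hence stated before it)
theorem pvContains_add (vis : PySem.Set Int) (nb u : Int) (h : nb ∉ vis) :
    PySem.Set.contains (PySem.Set.add vis nb) u = (PySem.Set.contains vis u || (u == nb)) := by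
  rw [PySem.Set.add_of_not_mem h]
  simp only [PySem.Set.contains, List.contains_append, List.contains_cons, List.contains_nil,
    Bool.or_false]

theorem pvFilter_drop_one (l : List Int) (hl : l.Nodup) (nb : Int) (hmem : nb ∈ l)
    (p : Int → Bool) (hp : p nb = true) :
    (l.filter (fun u => p u && !(u == nb))).length + 1 = (l.filter p).length := by
  induction l with
  | nil => cases hmem
  | cons a rest ih =>
    rcases List.mem_cons.1 hmem with he | hmem'
    · subst he
      have hrest : ∀ u ∈ rest, (p u && !(u == nb)) = p u := by
        intro u hu
        have : u ≠ nb := fun e => (List.nodup_cons.1 hl).1 (e ▸ hu)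
        simp [this]
      simp only [List.filter_cons, hp, beq_self_eq_true, Bool.not_true, Bool.and_false,
        if_true]
      rw [List.filter_congr hrest]
      simp
    · have ha : a ≠ nb := fun e => (List.nodup_cons.1 hl).1 (e ▸ hmem')
      have ih' := ih (List.nodup_cons.1 hl).2 hmem'
      by_cases hpa : p a = true
      · simp only [List.filter_cons, hpa, if_true, List.length_cons]
        simp [ha]
        omega
      · simp at hpa
        simp [hpa, ih']

theorem pvSlack_add (unvisited : List Int) (vis : PySem.Set Int) (nb : Int)
    (h1 : nb ∈ unvisited) (h2 : nb ∉ vis) :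
    pvSlack unvisited (PySem.Set.add vis nb) + 1 = pvSlack unvisited vis := by
  unfold pvSlack
  have hpred : (fun u => !(PySem.Set.contains (PySem.Set.add vis nb) u)) =
      (fun u => (!(PySem.Set.contains vis u)) && !(u == nb)) := by
    funext u
    rw [pvContains_add vis nb u h2]
    cases PySem.Set.contains vis u <;> cases (u == nb) <;> rfl
  rw [hpred]
  exact pvFilter_drop_one _ (PySem.List.nodup_dedup _) nb
    ((PySem.List.mem_dedup _ _).2 h1) _ (by simp [h2])

-- cited by `decreasing_by` of pvLoopA below (hence stated before it)
theorem pvStepA_measure (unvisited : List Int) (current : Option Int) (nbs : List Int) :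
    ∀ (vis : PySem.Set Int) (app : List Int) (s : Int),
      2 * pvSlack unvisited (nbs.foldl (pvStepA unvisited current) (vis, app, s)).1
        + (nbs.foldl (pvStepA unvisited current) (vis, app, s)).2.1.length
      ≤ 2 * pvSlack unvisited vis + app.length := by
  induction nbs with
  | nil => intro vis app s; simp
  | cons nb rest ih =>
    intro vis app s
    simp only [List.foldl_cons, pvStepA]
    by_cases hc : ((some nb == current) || PySem.Set.contains vis nb
        || !decide (nb ∈ unvisited)) = true
    · rw [if_pos hc]; exact ih vis app s
    · rw [if_neg hc]
      have h2 : PySem.Set.contains vis nb = false := by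
        revert hc; cases (some nb == current) <;> cases (PySem.Set.contains vis nb) <;>
          cases (decide (nb ∈ unvisited)) <;> simp
      have h3 : nb ∈ unvisited := by
        revert hc; cases (some nb == current) <;> cases (PySem.Set.contains vis nb) <;>
          by_cases hm : nb ∈ unvisited <;> simp [hm]
      have hnvis : nb ∉ vis := by
        intro hm
        rw [(PySem.Set.contains_iff vis nb).2 hm] at h2
        cases h2
      have hs := pvSlack_add unvisited vis nb h3 hnvis
      have hrec := ih (PySem.Set.add vis nb) (app ++ [nb]) (s + 1)
      simp only [List.length_append, List.length_cons, List.length_nil] at hrec ⊢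
      omega

-- A's while-loop over the queue of (node, depth) pairs
def pvLoopA (adjacency : List (Int × List Int)) (unvisited : List Int) (current : Option Int)
    (max_depth : Int) : PySem.Set Int → List (Int × Int) → Int → Int
  | _, [], support => support
  | vis, (node, depth) :: queue, support =>
    if max_depth ≤ depth then
      pvLoopA adjacency unvisited current max_depth vis queue support
    else
      let r := (PySem.Dict.getD (PySem.Dict.mk adjacency) node []).foldl
                 (pvStepA unvisited current) (vis, [], support)
      pvLoopA adjacency unvisited current max_depth r.1
        (queue ++ r.2.1.map (fun nb => (nb, depth + 1))) r.2.2
termination_by vis queue support => 2 * pvSlack unvisited vis + queue.length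
decreasing_by
  · simp only [List.length_cons]; omega
  · have h := pvStepA_measure unvisited current
      (PySem.Dict.getD (PySem.Dict.mk adjacency) node []) vis [] support
    simp only [List.length_nil, List.length_append, List.length_cons, List.length_map] at *
    omega

def count_frontier_support_py (cell : Int) (adjacency : List (Int × List Int)) (unvisited : List Int) (current : Option Int) (max_depth : Int) : Int :=
  pvLoopA adjacency unvisited current max_depth (PySem.Set.ofList [cell]) [(cell, 0)] 0

-- ===== PORT B =====
-- inner `if nb != current and nb in unvisited: nxt.add(nb)` of B
def pvInnerC (unvisited : List Int) (current : Option Int)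
    (acc : PySem.Set Int) (nb : Int) : PySem.Set Int :=
  if !(some nb == current) && decide (nb ∈ unvisited) then PySem.Set.add acc nb else acc

-- one round: `nxt = set(reached); for node in reached: for nb in adjacency.get(node, []): …`
def pvRoundC (adjacency : List (Int × List Int)) (unvisited : List Int) (current : Option Int)
    (reached : PySem.Set Int) : PySem.Set Int :=
  reached.foldl
    (fun acc node => (PySem.Dict.getD (PySem.Dict.mk adjacency) node []).foldl
      (pvInnerC unvisited current) acc)
    reached

-- B's `for _ in range(max_depth)` loop with the `if len(nxt) == len(reached): break` fixpoint exit
def pvLoopC (adjacency : List (Int × List Int)) (unvisited : List Int) (current : Option Int) :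
    Nat → PySem.Set Int → PySem.Set Int
  | 0, reached => reached
  | n + 1, reached =>
    let nxt := pvRoundC adjacency unvisited current reached
    if nxt.length = reached.length then reached
    else pvLoopC adjacency unvisited current n nxt

def count_frontier_support_py_alt (cell : Int) (adjacency : List (Int × List Int)) (unvisited : List Int) (current : Option Int) (max_depth : Int) : Int :=
  ((pvLoopC adjacency unvisited current max_depth.toNat (PySem.Set.ofList [cell])).length : Int) - 1

-- ===== PRECONDITION & SPEC =====
-- first-match lookup `adjacency[u]` with default [] (used by Pre_ below and by the proofs)
def pvAdjf (adjacency : List (Int × List Int)) (u : Int) : List Int :=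
  PySem.Dict.getD (PySem.Dict.mk adjacency) u []

-- Pre_ excludes the inputs where Python A raises KeyError (a looked-up node not a key of
-- adjacency): it is exact for max_depth ≤ 3 (cell, its allowed depth-1 neighbors and the
-- allowed depth-2 nodes must be keys insofar as A looks them up); for max_depth ≥ 4 the
-- last clause over-approximates — every allowed neighbor of any node A could ever dequeue
-- must be a key — so it also excludes some inputs on which A returns (node never reached).
def Pre_count_frontier_support_py (cell : Int) (adjacency : List (Int × List Int)) (unvisited : List Int) (current : Option Int) (max_depth : Int) : Prop :=
  (let isKey := fun v : Int => adjacency.any (fun p => p.1 == v);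
   let allowed := fun v : Int => decide (v ∈ unvisited) && !(some v == current) && !(v == cell);
   let n1 := (pvAdjf adjacency cell).filter allowed;
   decide (max_depth ≤ 0) ||
     (isKey cell &&
       (max_depth == 1 ||
         (n1.all isKey &&
           (max_depth == 2 ||
             (n1.all (fun w => (pvAdjf adjacency w).all
                 (fun v => !(allowed v) || n1.contains v || isKey v)) &&
               (max_depth == 3 ||
                 adjacency.all (fun p =>
                   !(p.1 == cell || (decide (p.1 ∈ unvisited) && !(some p.1 == current))) ||
                     p.2.all (fun v => !(allowed v) || isKey v))))))))) = true
instance (cell : Int) (adjacency : List (Int × List Int)) (unvisited : List Int) (current : Option Int) (max_depth : Int) : Decidable (Pre_count_frontier_support_py cell adjacency unvisited current max_depth) := by unfold Pre_count_frontier_support_py; infer_instance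

def pvWitness_count_frontier_support_py : Int × (List (Int × List Int)) × List Int × Option Int × Int :=
  (0, [(0, [1, 2]), (1, [2]), (2, [])], [1, 2], some 2, 2)

def Spec_count_frontier_support_py (cell : Int) (adjacency : List (Int × List Int)) (unvisited : List Int) (current : Option Int) (max_depth : Int) (out : Int) : Prop := out = count_frontier_support_py_alt cell adjacency unvisited current max_depth
instance (cell : Int) (adjacency : List (Int × List Int)) (unvisited : List Int) (current : Option Int) (max_depth : Int) (out : Int) : Decidable (Spec_count_frontier_support_py cell adjacency unvisited current max_depth out) := by unfold Spec_count_frontier_support_py; infer_instance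

-- ===== CLAIM (what is proved, stated in full; the proofs are below) =====
def Claim_equal_count_frontier_support_py : Prop := ∀ (cell : Int) (adjacency : List (Int × List Int)) (unvisited : List Int) (current : Option Int) (max_depth : Int), Dom_count_frontier_support_py cell adjacency unvisited current max_depth → Pre_count_frontier_support_py cell adjacency unvisited current max_depth → Spec_count_frontier_support_py cell adjacency unvisited current max_depth (count_frontier_support_py cell adjacency unvisited current max_depth)

-- ===== LEMMAS AND PROOFS =====

-- Proof-side intermediate: a level-synchronous BFS (frontier per depth level).  Stage 1 below
-- proves port A equal to it; stage 2 proves it equal to port B's fixpoint iteration.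
def pvStepB (unvisited : List Int) (current : Option Int)
    (st : PySem.Set Int × List Int) (neighbor : Int) : PySem.Set Int × List Int :=
  if !(some neighbor == current) && !(PySem.Set.contains st.1 neighbor) && decide (neighbor ∈ unvisited) then
    (PySem.Set.add st.1 neighbor, st.2 ++ [neighbor])
  else
    st

def pvLevelB (adjacency : List (Int × List Int)) (unvisited : List Int) (current : Option Int)
    (vis : PySem.Set Int) (frontier : List Int) : PySem.Set Int × List Int :=
  frontier.foldl
    (fun st node => (PySem.Dict.getD (PySem.Dict.mk adjacency) node []).foldl
      (pvStepB unvisited current) st)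
    (vis, [])

def pvLoopLvl (adjacency : List (Int × List Int)) (unvisited : List Int) (current : Option Int) :
    Nat → PySem.Set Int → List Int → Int → Int
  | 0, _, _, support => support
  | n + 1, vis, frontier, support =>
    if frontier = [] then support
    else
      let r := pvLevelB adjacency unvisited current vis frontier
      pvLoopLvl adjacency unvisited current n r.1 r.2 (support + r.2.length)

-- abbreviation used throughout the proofs
def pvOk (unvisited : List Int) (current : Option Int) (x : Int) : Prop :=
  ((some x == current) = false) ∧ x ∈ unvisited

-- ---------- Stage 1: port A = level-synchronous BFS ----------

theorem pvFoldA_eq_foldB (unvisited : List Int) (current : Option Int) (nbs : List Int) :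
    ∀ (vis : PySem.Set Int) (app : List Int) (s : Int),
      nbs.foldl (pvStepA unvisited current) (vis, app, s) =
        ((nbs.foldl (pvStepB unvisited current) (vis, app)).1,
         (nbs.foldl (pvStepB unvisited current) (vis, app)).2,
         s + (nbs.foldl (pvStepB unvisited current) (vis, app)).2.length - app.length) := by
  induction nbs with
  | nil => intro vis app s; simp
  | cons nb rest ih =>
    intro vis app s
    simp only [List.foldl_cons, pvStepA, pvStepB]
    by_cases hb : (!(some nb == current) && !(PySem.Set.contains vis nb)
        && decide (nb ∈ unvisited)) = true
    · have ha : ¬ (((some nb == current) || PySem.Set.contains vis nb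
          || !decide (nb ∈ unvisited)) = true) := by
        revert hb; cases (some nb == current) <;> cases (PySem.Set.contains vis nb) <;>
          cases (decide (nb ∈ unvisited)) <;> simp
      rw [if_neg ha, if_pos hb]
      rw [ih (PySem.Set.add vis nb) (app ++ [nb]) (s + 1)]
      simp only [List.length_append, List.length_cons, List.length_nil, Prod.mk.injEq]
      refine ⟨trivial, trivial, ?_⟩
      push_cast
      ring
    · have ha : ((some nb == current) || PySem.Set.contains vis nb
          || !decide (nb ∈ unvisited)) = true := by
        revert hb; cases (some nb == current) <;> cases (PySem.Set.contains vis nb) <;>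
          cases (decide (nb ∈ unvisited)) <;> simp
      rw [if_pos ha, if_neg hb]
      exact ih vis app s

theorem pvFoldB_acc (unvisited : List Int) (current : Option Int) (nbs : List Int) :
    ∀ (vis : PySem.Set Int) (app : List Int),
      nbs.foldl (pvStepB unvisited current) (vis, app) =
        ((nbs.foldl (pvStepB unvisited current) (vis, [])).1,
         app ++ (nbs.foldl (pvStepB unvisited current) (vis, [])).2) := by
  induction nbs with
  | nil => intro vis app; simp
  | cons nb rest ih =>
    intro vis app
    simp only [List.foldl_cons, pvStepB]
    by_cases hb : (!(some nb == current) && !(PySem.Set.contains vis nb)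
        && decide (nb ∈ unvisited)) = true
    · simp only [if_pos hb]
      rw [ih (PySem.Set.add vis nb) (app ++ [nb]), ih (PySem.Set.add vis nb) ([] ++ [nb])]
      simp [List.append_assoc]
    · simp only [if_neg hb]
      exact ih vis app

theorem pvLevelB_acc (adjacency : List (Int × List Int)) (unvisited : List Int)
    (current : Option Int) (frontier : List Int) :
    ∀ (vis : PySem.Set Int) (app : List Int),
      frontier.foldl
        (fun st node => (PySem.Dict.getD (PySem.Dict.mk adjacency) node []).foldl
          (pvStepB unvisited current) st) (vis, app) =
        ((pvLevelB adjacency unvisited current vis frontier).1,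
         app ++ (pvLevelB adjacency unvisited current vis frontier).2) := by
  induction frontier with
  | nil => intro vis app; simp [pvLevelB]
  | cons node rest ih =>
    intro vis app
    simp only [List.foldl_cons, pvLevelB]
    rw [pvFoldB_acc unvisited current _ vis app]
    rw [ih _ (app ++ _)]
    conv_rhs =>
      rw [show (PySem.Dict.getD (PySem.Dict.mk adjacency) node []).foldl
            (pvStepB unvisited current) (vis, []) =
          (((PySem.Dict.getD (PySem.Dict.mk adjacency) node []).foldl
            (pvStepB unvisited current) (vis, [])).1,
           ((PySem.Dict.getD (PySem.Dict.mk adjacency) node []).foldl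
            (pvStepB unvisited current) (vis, [])).2) from rfl]
      rw [ih _ _]
    simp [pvLevelB, List.append_assoc]

theorem pvLoopA_skip (adjacency : List (Int × List Int)) (unvisited : List Int)
    (current : Option Int) (max_depth d : Int) (hd : max_depth ≤ d) (xs : List Int) :
    ∀ (vis : PySem.Set Int) (q : List (Int × Int)) (s : Int),
      pvLoopA adjacency unvisited current max_depth vis (xs.map (fun x => (x, d)) ++ q) s =
        pvLoopA adjacency unvisited current max_depth vis q s := by
  induction xs with
  | nil => intro vis q s; simp
  | cons x rest ih =>
    intro vis q s
    simp only [List.map_cons, List.cons_append]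
    rw [pvLoopA, if_pos hd]
    exact ih vis q s

theorem pvLoopA_level (adjacency : List (Int × List Int)) (unvisited : List Int)
    (current : Option Int) (max_depth d : Int) (hd : d < max_depth) (xs : List Int) :
    ∀ (ys : List Int) (vis : PySem.Set Int) (s : Int),
      pvLoopA adjacency unvisited current max_depth vis
          (xs.map (fun x => (x, d)) ++ ys.map (fun x => (x, d + 1))) s =
        pvLoopA adjacency unvisited current max_depth
          (pvLevelB adjacency unvisited current vis xs).1
          ((ys ++ (pvLevelB adjacency unvisited current vis xs).2).map (fun x => (x, d + 1)))
          (s + (pvLevelB adjacency unvisited current vis xs).2.length) := by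
  induction xs with
  | nil =>
    intro ys vis s
    simp [pvLevelB]
  | cons x rest ih =>
    intro ys vis s
    simp only [List.map_cons, List.cons_append]
    rw [pvLoopA, if_neg (by omega)]
    rw [pvFoldA_eq_foldB]
    have hq : (rest.map (fun x => (x, d)) ++ ys.map (fun x => (x, d + 1))) ++
        ((PySem.Dict.getD (PySem.Dict.mk adjacency) x []).foldl
          (pvStepB unvisited current) (vis, [])).2.map (fun nb => (nb, d + 1)) =
        rest.map (fun x => (x, d)) ++
          (ys ++ ((PySem.Dict.getD (PySem.Dict.mk adjacency) x []).foldl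
            (pvStepB unvisited current) (vis, [])).2).map (fun x => (x, d + 1)) := by
      simp [List.map_append, List.append_assoc]
    simp only [List.length_nil]
    rw [hq, ih]
    have hlvl : pvLevelB adjacency unvisited current vis (x :: rest) =
        ((pvLevelB adjacency unvisited current
            (((PySem.Dict.getD (PySem.Dict.mk adjacency) x []).foldl
              (pvStepB unvisited current) (vis, [])).1) rest).1,
         ((PySem.Dict.getD (PySem.Dict.mk adjacency) x []).foldl
              (pvStepB unvisited current) (vis, [])).2 ++
           (pvLevelB adjacency unvisited current
            (((PySem.Dict.getD (PySem.Dict.mk adjacency) x []).foldl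
              (pvStepB unvisited current) (vis, [])).1) rest).2) := by
      show (x :: rest).foldl _ (vis, ([] : List Int)) = _
      rw [List.foldl_cons]
      rw [show (PySem.Dict.getD (PySem.Dict.mk adjacency) x []).foldl
            (pvStepB unvisited current) (vis, ([] : List Int)) =
          (((PySem.Dict.getD (PySem.Dict.mk adjacency) x []).foldl
            (pvStepB unvisited current) (vis, [])).1,
           ((PySem.Dict.getD (PySem.Dict.mk adjacency) x []).foldl
            (pvStepB unvisited current) (vis, [])).2) from rfl]
      exact pvLevelB_acc adjacency unvisited current rest _ _
    rw [hlvl]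
    simp only [List.append_assoc, List.length_append]
    congr 1
    push_cast
    ring

theorem pvLoopLvl_eq_loopA (adjacency : List (Int × List Int)) (unvisited : List Int)
    (current : Option Int) (max_depth : Int) (n : Nat) :
    ∀ (vis : PySem.Set Int) (frontier : List Int) (s : Int),
      pvLoopLvl adjacency unvisited current n vis frontier s =
        pvLoopA adjacency unvisited current max_depth vis
          (frontier.map (fun x => (x, max_depth - n))) s := by
  induction n with
  | zero =>
    intro vis frontier s
    have h := pvLoopA_skip adjacency unvisited current max_depth (max_depth - (0 : Nat))
      (by simp) frontier vis [] s
    simp only [List.append_nil] at h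
    rw [h]
    simp [pvLoopLvl, pvLoopA]
  | succ n ih =>
    intro vis frontier s
    by_cases hf : frontier = []
    · subst hf
      simp [pvLoopLvl, pvLoopA]
    · rw [pvLoopLvl, if_neg hf]
      rw [ih]
      have hd : max_depth - ((n : Int) + 1) < max_depth := by omega
      have h := pvLoopA_level adjacency unvisited current max_depth
        (max_depth - ((n : Int) + 1)) hd frontier [] vis s
      simp only [List.map_nil, List.append_nil, List.nil_append] at h
      have hcast : ((n + 1 : Nat) : Int) = (n : Int) + 1 := by push_cast; ring
      have hdd : max_depth - ((n : Int) + 1) + 1 = max_depth - (n : Int) := by ring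
      rw [hcast, h, hdd]

-- port A equals the level-synchronous BFS started from {cell}
theorem pvA_eq_level (cell : Int) (adjacency : List (Int × List Int)) (unvisited : List Int)
    (current : Option Int) (max_depth : Int) :
    count_frontier_support_py cell adjacency unvisited current max_depth =
      pvLoopLvl adjacency unvisited current max_depth.toNat
        (PySem.Set.ofList [cell]) [cell] 0 := by
  unfold count_frontier_support_py
  rw [pvLoopLvl_eq_loopA adjacency unvisited current max_depth max_depth.toNat]
  rcases le_or_gt max_depth 0 with h | h
  · have h0 : max_depth.toNat = 0 := Int.toNat_of_nonpos h
    rw [h0]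
    have h1 := pvLoopA_skip adjacency unvisited current max_depth (max_depth - 0)
      (by omega) [cell] (PySem.Set.ofList [cell]) [] 0
    have h2 := pvLoopA_skip adjacency unvisited current max_depth 0
      (by omega) [cell] (PySem.Set.ofList [cell]) [] 0
    simp only [List.map_cons, List.map_nil, List.append_nil,
      Nat.cast_zero, sub_zero] at h1 h2 ⊢
    rw [h2, h1]
  · have h0 : max_depth - max_depth.toNat = 0 := by omega
    rw [h0]
    simp

-- ---------- Stage 2: level-synchronous BFS = fixpoint closure iteration ----------

-- membership after B's inner neighbor fold
theorem pvInnerC_mem (unvisited : List Int) (current : Option Int) (nbs : List Int) :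
    ∀ (acc : PySem.Set Int) (x : Int),
      x ∈ nbs.foldl (pvInnerC unvisited current) acc ↔
        x ∈ acc ∨ (pvOk unvisited current x ∧ x ∈ nbs) := by
  induction nbs with
  | nil => intro acc x; simp
  | cons nb rest ih =>
    intro acc x
    simp only [List.foldl_cons, pvInnerC]
    rw [ih]
    by_cases hc : (!(some nb == current) && decide (nb ∈ unvisited)) = true
    · rw [if_pos hc]
      have hok : pvOk unvisited current nb := by
        unfold pvOk
        revert hc; cases h : (some nb == current) <;> simp
      rw [PySem.Set.mem_add]
      constructor
      · rintro (⟨h | h⟩ | ⟨h1, h2⟩)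
        · exact Or.inl h
        · exact Or.inr ⟨h ▸ hok, by simp [h]⟩
        · exact Or.inr ⟨h1, by simp [h2]⟩
      · rintro (h | ⟨h1, h2⟩)
        · exact Or.inl (Or.inl h)
        · rcases List.mem_cons.1 h2 with he | hm
          · exact Or.inl (Or.inr he)
          · exact Or.inr ⟨h1, hm⟩
    · rw [if_neg hc]
      constructor
      · rintro (h | ⟨h1, h2⟩)
        · exact Or.inl h
        · exact Or.inr ⟨h1, List.mem_cons_of_mem _ h2⟩
      · rintro (h | ⟨h1, h2⟩)
        · exact Or.inl h
        · rcases List.mem_cons.1 h2 with he | hm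
          · exfalso
            subst he
            rcases h1 with ⟨hne, hu⟩
            simp [hne, hu] at hc
          · exact Or.inr ⟨h1, hm⟩

theorem pvInnerC_nodup (unvisited : List Int) (current : Option Int) (nbs : List Int) :
    ∀ (acc : PySem.Set Int), acc.Nodup → (nbs.foldl (pvInnerC unvisited current) acc).Nodup := by
  induction nbs with
  | nil => intro acc h; exact h
  | cons nb rest ih =>
    intro acc h
    simp only [List.foldl_cons, pvInnerC]
    by_cases hc : (!(some nb == current) && decide (nb ∈ unvisited)) = true
    · rw [if_pos hc]; exact ih _ (PySem.Set.nodup_add _ _ h)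
    · rw [if_neg hc]; exact ih _ h

-- membership after one whole round of B (snapshot semantics: `reached` is frozen)
theorem pvRoundC_fold_mem (adjacency : List (Int × List Int)) (unvisited : List Int)
    (current : Option Int) (l : List Int) :
    ∀ (acc : PySem.Set Int) (x : Int),
      x ∈ l.foldl (fun acc node => (PySem.Dict.getD (PySem.Dict.mk adjacency) node []).foldl
            (pvInnerC unvisited current) acc) acc ↔
        x ∈ acc ∨ (pvOk unvisited current x ∧ ∃ u ∈ l, x ∈ pvAdjf adjacency u) := by
  induction l with
  | nil => intro acc x; simp
  | cons node rest ih =>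
    intro acc x
    simp only [List.foldl_cons]
    rw [ih, pvInnerC_mem]
    unfold pvAdjf
    constructor
    · rintro (⟨h | ⟨h1, h2⟩⟩ | ⟨h1, u, hu, h2⟩)
      · exact Or.inl h
      · exact Or.inr ⟨h1, node, List.mem_cons_self, h2⟩
      · exact Or.inr ⟨h1, u, List.mem_cons_of_mem _ hu, h2⟩
    · rintro (h | ⟨h1, u, hu, h2⟩)
      · exact Or.inl (Or.inl h)
      · rcases List.mem_cons.1 hu with he | hm
        · exact Or.inl (Or.inr ⟨h1, he ▸ h2⟩)
        · exact Or.inr ⟨h1, u, hm, h2⟩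

theorem pvRoundC_mem (adjacency : List (Int × List Int)) (unvisited : List Int)
    (current : Option Int) (r : PySem.Set Int) (x : Int) :
    x ∈ pvRoundC adjacency unvisited current r ↔
      x ∈ r ∨ (pvOk unvisited current x ∧ ∃ u ∈ r, x ∈ pvAdjf adjacency u) :=
  pvRoundC_fold_mem adjacency unvisited current r r x

theorem pvRoundC_fold_nodup (adjacency : List (Int × List Int)) (unvisited : List Int)
    (current : Option Int) (l : List Int) :
    ∀ (acc : PySem.Set Int), acc.Nodup →
      (l.foldl (fun acc node => (PySem.Dict.getD (PySem.Dict.mk adjacency) node []).foldl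
        (pvInnerC unvisited current) acc) acc).Nodup := by
  induction l with
  | nil => intro acc h; exact h
  | cons node rest ih =>
    intro acc h
    simp only [List.foldl_cons]
    exact ih _ (pvInnerC_nodup unvisited current _ acc h)

theorem pvRoundC_nodup (adjacency : List (Int × List Int)) (unvisited : List Int)
    (current : Option Int) (r : PySem.Set Int) (h : r.Nodup) :
    (pvRoundC adjacency unvisited current r).Nodup :=
  pvRoundC_fold_nodup adjacency unvisited current r r h

-- structure of the level fold: visited' = visited ++ new_frontier
theorem pvStepB_fold_shape (unvisited : List Int) (current : Option Int) (nbs : List Int) :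
    ∀ (v : PySem.Set Int) (l : List Int),
      ∃ t, nbs.foldl (pvStepB unvisited current) (v, l) = (v ++ t, l ++ t) := by
  induction nbs with
  | nil => intro v l; exact ⟨[], by simp⟩
  | cons nb rest ih =>
    intro v l
    simp only [List.foldl_cons, pvStepB]
    by_cases hc : (!(some nb == current) && !(PySem.Set.contains v nb)
        && decide (nb ∈ unvisited)) = true
    · rw [if_pos hc]
      have hnm : nb ∉ v := by
        intro hm
        rw [(PySem.Set.contains_iff v nb).2 hm] at hc
        simp at hc
      rw [PySem.Set.add_of_not_mem hnm]
      obtain ⟨t, ht⟩ := ih (v ++ [nb]) (l ++ [nb])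
      exact ⟨nb :: t, by rw [ht]; simp⟩
    · rw [if_neg hc]
      exact ih v l

theorem pvStepB_fold_mem (unvisited : List Int) (current : Option Int) (nbs : List Int) :
    ∀ (v : PySem.Set Int) (l : List Int) (x : Int),
      x ∈ (nbs.foldl (pvStepB unvisited current) (v, l)).1 ↔
        x ∈ v ∨ (pvOk unvisited current x ∧ x ∈ nbs) := by
  induction nbs with
  | nil => intro v l x; simp
  | cons nb rest ih =>
    intro v l x
    simp only [List.foldl_cons, pvStepB]
    by_cases hc : (!(some nb == current) && !(PySem.Set.contains v nb)
        && decide (nb ∈ unvisited)) = true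
    · rw [if_pos hc]
      rw [ih]
      have hok : pvOk unvisited current nb := by
        unfold pvOk
        revert hc; cases h : (some nb == current) <;> simp
      rw [PySem.Set.mem_add]
      constructor
      · rintro (⟨h | h⟩ | ⟨h1, h2⟩)
        · exact Or.inl h
        · exact Or.inr ⟨h ▸ hok, by simp [h]⟩
        · exact Or.inr ⟨h1, by simp [h2]⟩
      · rintro (h | ⟨h1, h2⟩)
        · exact Or.inl (Or.inl h)
        · rcases List.mem_cons.1 h2 with he | hm
          · exact Or.inl (Or.inr he)
          · exact Or.inr ⟨h1, hm⟩
    · rw [if_neg hc]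
      rw [ih]
      constructor
      · rintro (h | ⟨h1, h2⟩)
        · exact Or.inl h
        · exact Or.inr ⟨h1, List.mem_cons_of_mem _ h2⟩
      · rintro (h | ⟨h1, h2⟩)
        · exact Or.inl h
        · rcases List.mem_cons.1 h2 with he | hm
          · subst he
            rcases h1 with ⟨hne, hu⟩
            by_cases hv : x ∈ v
            · exact Or.inl hv
            · exfalso
              have hcf : PySem.Set.contains v x = false := by
                cases h : PySem.Set.contains v x
                · rfl
                · exact absurd ((PySem.Set.contains_iff v x).1 h) hv
              exact hc (by simp [hne, hu, hv, hcf])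
          · exact Or.inr ⟨h1, hm⟩

theorem pvStepB_fold_nodup (unvisited : List Int) (current : Option Int) (nbs : List Int) :
    ∀ (v : PySem.Set Int) (l : List Int), v.Nodup →
      (nbs.foldl (pvStepB unvisited current) (v, l)).1.Nodup := by
  induction nbs with
  | nil => intro v l h; exact h
  | cons nb rest ih =>
    intro v l h
    simp only [List.foldl_cons, pvStepB]
    by_cases hc : (!(some nb == current) && !(PySem.Set.contains v nb)
        && decide (nb ∈ unvisited)) = true
    · rw [if_pos hc]; exact ih _ _ (PySem.Set.nodup_add _ _ h)
    · rw [if_neg hc]; exact ih _ _ h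

theorem pvLevelB_fold_shape (adjacency : List (Int × List Int)) (unvisited : List Int)
    (current : Option Int) (frontier : List Int) :
    ∀ (v : PySem.Set Int) (l : List Int),
      ∃ t, frontier.foldl
        (fun st node => (PySem.Dict.getD (PySem.Dict.mk adjacency) node []).foldl
          (pvStepB unvisited current) st) (v, l) = (v ++ t, l ++ t) := by
  induction frontier with
  | nil => intro v l; exact ⟨[], by simp⟩
  | cons node rest ih =>
    intro v l
    simp only [List.foldl_cons]
    obtain ⟨t1, ht1⟩ := pvStepB_fold_shape unvisited current
      (PySem.Dict.getD (PySem.Dict.mk adjacency) node []) v l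
    rw [ht1]
    obtain ⟨t2, ht2⟩ := ih (v ++ t1) (l ++ t1)
    exact ⟨t1 ++ t2, by rw [ht2]; simp [List.append_assoc]⟩

theorem pvLevelB_shape (adjacency : List (Int × List Int)) (unvisited : List Int)
    (current : Option Int) (frontier : List Int) (vis : PySem.Set Int) :
    (pvLevelB adjacency unvisited current vis frontier).1 =
      vis ++ (pvLevelB adjacency unvisited current vis frontier).2 := by
  obtain ⟨t, ht⟩ := pvLevelB_fold_shape adjacency unvisited current frontier vis []
  unfold pvLevelB
  rw [ht]
  simp

-- splitting pvLevelB at the head of the frontier (the `hlvl` step of pvLoopA_level, as a lemma)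
theorem pvLevelB_cons (adjacency : List (Int × List Int)) (unvisited : List Int)
    (current : Option Int) (node : Int) (rest : List Int) (vis : PySem.Set Int) :
    pvLevelB adjacency unvisited current vis (node :: rest) =
      ((pvLevelB adjacency unvisited current
          (((PySem.Dict.getD (PySem.Dict.mk adjacency) node []).foldl
            (pvStepB unvisited current) (vis, [])).1) rest).1,
       ((PySem.Dict.getD (PySem.Dict.mk adjacency) node []).foldl
            (pvStepB unvisited current) (vis, [])).2 ++
         (pvLevelB adjacency unvisited current
          (((PySem.Dict.getD (PySem.Dict.mk adjacency) node []).foldl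
            (pvStepB unvisited current) (vis, [])).1) rest).2) := by
  show (node :: rest).foldl _ (vis, ([] : List Int)) = _
  rw [List.foldl_cons]
  rw [show (PySem.Dict.getD (PySem.Dict.mk adjacency) node []).foldl
        (pvStepB unvisited current) (vis, ([] : List Int)) =
      (((PySem.Dict.getD (PySem.Dict.mk adjacency) node []).foldl
        (pvStepB unvisited current) (vis, [])).1,
       ((PySem.Dict.getD (PySem.Dict.mk adjacency) node []).foldl
        (pvStepB unvisited current) (vis, [])).2) from rfl]
  exact pvLevelB_acc adjacency unvisited current rest _ _

theorem pvLevelB_mem (adjacency : List (Int × List Int)) (unvisited : List Int)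
    (current : Option Int) (frontier : List Int) :
    ∀ (vis : PySem.Set Int) (x : Int),
      x ∈ (pvLevelB adjacency unvisited current vis frontier).1 ↔
        x ∈ vis ∨ (pvOk unvisited current x ∧ ∃ u ∈ frontier, x ∈ pvAdjf adjacency u) := by
  induction frontier with
  | nil => intro vis x; simp [pvLevelB]
  | cons node rest ih =>
    intro vis x
    rw [pvLevelB_cons]
    simp only
    rw [ih, pvStepB_fold_mem]
    unfold pvAdjf
    rw [List.exists_mem_cons_iff]
    tauto

theorem pvLevelB_nodup (adjacency : List (Int × List Int)) (unvisited : List Int)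
    (current : Option Int) (frontier : List Int) :
    ∀ (vis : PySem.Set Int), vis.Nodup →
      (pvLevelB adjacency unvisited current vis frontier).1.Nodup := by
  induction frontier with
  | nil => intro vis h; exact h
  | cons node rest ih =>
    intro vis h
    rw [pvLevelB_cons]
    exact ih _ (pvStepB_fold_nodup unvisited current _ vis [] h)

theorem pvLoopLvl_nil (adjacency : List (Int × List Int)) (unvisited : List Int)
    (current : Option Int) (n : Nat) (vis : PySem.Set Int) (s : Int) :
    pvLoopLvl adjacency unvisited current n vis [] s = s := by
  cases n <;> simp [pvLoopLvl]

-- the main simulation: level BFS with counter = fixpoint iteration with final size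
theorem pvStage2 (adjacency : List (Int × List Int)) (unvisited : List Int)
    (current : Option Int) :
    ∀ (n : Nat) (vis : PySem.Set Int) (fr : List Int) (s : Int) (r : PySem.Set Int),
      vis.Nodup → r.Nodup → (∀ x, x ∈ vis ↔ x ∈ r) → (∀ x ∈ fr, x ∈ vis) →
      s + 1 = (vis.length : Int) →
      (∀ u ∈ vis, u ∉ fr → ∀ v ∈ pvAdjf adjacency u, pvOk unvisited current v → v ∈ vis) →
      pvLoopLvl adjacency unvisited current n vis fr s =
        ((pvLoopC adjacency unvisited current n r).length : Int) - 1 := by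
  intro n
  induction n with
  | zero =>
    intro vis fr s r hv hr hm hfr hs hcl
    have hperm : vis.Perm r := (List.perm_ext_iff_of_nodup hv hr).2 hm
    have hlen := hperm.length_eq
    simp only [pvLoopLvl, pvLoopC]
    omega
  | succ n ih =>
    intro vis fr s r hv hr hm hfr hs hcl
    have hperm : vis.Perm r := (List.perm_ext_iff_of_nodup hv hr).2 hm
    have hvr : vis.length = r.length := hperm.length_eq
    have hNmem := pvRoundC_mem adjacency unvisited current r
    have hNnd := pvRoundC_nodup adjacency unvisited current r hr
    by_cases hfe : fr = []
    · subst hfe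
      rw [pvLoopLvl_nil]
      have hnm : ∀ x, x ∈ pvRoundC adjacency unvisited current r ↔ x ∈ r := by
        intro x
        rw [hNmem]
        constructor
        · rintro (h | ⟨hok, u, hu, hadj⟩)
          · exact h
          · exact (hm x).1 (hcl u ((hm u).2 hu) (by simp) x hadj hok)
        · exact Or.inl
      have hlen : (pvRoundC adjacency unvisited current r).length = r.length :=
        ((List.perm_ext_iff_of_nodup hNnd hr).2 hnm).length_eq
      simp only [pvLoopC]
      rw [if_pos hlen]
      omega
    · have hshape := pvLevelB_shape adjacency unvisited current fr vis
      have hVmem := pvLevelB_mem adjacency unvisited current fr vis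
      have hVnd := pvLevelB_nodup adjacency unvisited current fr vis hv
      have hsame : ∀ x, x ∈ (pvLevelB adjacency unvisited current vis fr).1 ↔
          x ∈ pvRoundC adjacency unvisited current r := by
        intro x
        rw [hVmem, hNmem]
        constructor
        · rintro (h | ⟨hok, u, hu, ha⟩)
          · exact Or.inl ((hm x).1 h)
          · exact Or.inr ⟨hok, u, (hm u).1 (hfr u hu), ha⟩
        · rintro (h | ⟨hok, u, hu, ha⟩)
          · exact Or.inl ((hm x).2 h)
          · have huv := (hm u).2 hu
            by_cases hun : u ∈ fr
            · exact Or.inr ⟨hok, u, hun, ha⟩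
            · exact Or.inl (hcl u huv hun x ha hok)
      have hVNlen : (pvLevelB adjacency unvisited current vis fr).1.length =
          (pvRoundC adjacency unvisited current r).length :=
        ((List.perm_ext_iff_of_nodup hVnd hNnd).2 hsame).length_eq
      have hsplitlen : (pvLevelB adjacency unvisited current vis fr).1.length =
          vis.length + (pvLevelB adjacency unvisited current vis fr).2.length := by
        rw [hshape, List.length_append]
      simp only [pvLoopLvl, pvLoopC]
      rw [if_neg hfe]
      by_cases hst : (pvRoundC adjacency unvisited current r).length = r.length
      · rw [if_pos hst]
        have hV2 : (pvLevelB adjacency unvisited current vis fr).2 = [] := by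
          have : (pvLevelB adjacency unvisited current vis fr).2.length = 0 := by omega
          exact List.eq_nil_of_length_eq_zero this
        rw [hV2, pvLoopLvl_nil]
        simp only [List.length_nil, Nat.cast_zero, add_zero]
        omega
      · rw [if_neg hst]
        have hfr' : ∀ x ∈ (pvLevelB adjacency unvisited current vis fr).2,
            x ∈ (pvLevelB adjacency unvisited current vis fr).1 := by
          intro x hx
          rw [hshape]
          exact List.mem_append_right _ hx
        have hs' : s + ((pvLevelB adjacency unvisited current vis fr).2.length : Int) + 1 =
            ((pvLevelB adjacency unvisited current vis fr).1.length : Int) := by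
          omega
        have hcl' : ∀ u ∈ (pvLevelB adjacency unvisited current vis fr).1,
            u ∉ (pvLevelB adjacency unvisited current vis fr).2 →
            ∀ v ∈ pvAdjf adjacency u, pvOk unvisited current v →
              v ∈ (pvLevelB adjacency unvisited current vis fr).1 := by
          intro u hu hnu v hvadj hok
          have hu' : u ∈ vis := by
            rcases List.mem_append.1 (hshape ▸ hu) with h | h
            · exact h
            · exact absurd h hnu
          by_cases hufr : u ∈ fr
          · exact (pvLevelB_mem adjacency unvisited current fr vis v).2
              (Or.inr ⟨hok, u, hufr, hvadj⟩)
          · have hvv := hcl u hu' hufr v hvadj hok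
            rw [hshape]
            exact List.mem_append_left _ hvv
        exact ih _ _ _ _ hVnd hNnd hsame hfr' hs' hcl'

-- ===== VERDICT (by name: the statement is the Claim_ definition above) =====
theorem count_frontier_support_py_spec : Claim_equal_count_frontier_support_py := by
  intro cell adjacency unvisited current max_depth _ _
  unfold Spec_count_frontier_support_py
  rw [pvA_eq_level]
  unfold count_frontier_support_py_alt
  have hcell : PySem.Set.ofList [cell] = [cell] := rfl
  rw [hcell]
  exact pvStage2 adjacency unvisited current max_depth.toNat [cell] [cell] 0 [cell]
    (List.nodup_singleton cell) (List.nodup_singleton cell)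
    (fun x => Iff.rfl) (fun x hx => hx) (by simp)
    (fun u hu hnu v hv hok => absurd hu (by simpa using hnu))
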